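-- pv_equiv track=rewrite | github.com/agussanguesa32/scrumDailiesTracker | utils/config.py | format_days_spanish
-- ===== SOURCE A (Python) =====
-- def sort_days(days: list) -> list:
--     """Ordena los días de la semana en orden cronológico"""
--     day_order = ['monday', 'tuesday', 'wednesday', 'thursday', 'friday', 'saturday', 'sunday']
--     return sorted(days, key=lambda x: day_order.index(x) if x in day_order else 999)
--
-- def format_days_spanish(days: list) -> str:
--     """Convierte y ordena días al español"""
--     days_map = {
--         'monday': 'Lunes',
--         'tuesday': 'Martes',
--         'wednesday': 'Miércoles',
--         'thursday': 'Jueves',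
--         'friday': 'Viernes',
--         'saturday': 'Sábado',
--         'sunday': 'Domingo'
--     }
--
--     sorted_days = sort_days(days)
--     return ", ".join([days_map.get(day, day.capitalize()) for day in sorted_days])
-- ===== SOURCE B (Python) =====
-- WEEK = [('monday', 'Lunes'), ('tuesday', 'Martes'), ('wednesday', 'Miércoles'),
--         ('thursday', 'Jueves'), ('friday', 'Viernes'), ('saturday', 'Sábado'),
--         ('sunday', 'Domingo')]
--
-- def format_days_spanish(days: list) -> str:
--     # No sorting: emit each weekday's Spanish label once per occurrence, in
--     # fixed chronological order, then the unknown entries capitalized in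
--     # their original input order.
--     parts = []
--     for eng, es in WEEK:
--         parts.extend([es] * days.count(eng))
--     known = [eng for eng, _ in WEEK]
--     parts.extend(d.capitalize() for d in days if d not in known)
--     return ", ".join(parts)
-- ===== Notes on version B (the rewrite author's own statement) =====
-- stated objective: simpler
-- what changed: B drops sorted()-with-index-key entirely: it walks the fixed seven-weekday list once emitting each Spanish label repeated by its occurrence count, then appends the unknown entries capitalized in original input order, relying on stability of A's sort.
import Mathlib
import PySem

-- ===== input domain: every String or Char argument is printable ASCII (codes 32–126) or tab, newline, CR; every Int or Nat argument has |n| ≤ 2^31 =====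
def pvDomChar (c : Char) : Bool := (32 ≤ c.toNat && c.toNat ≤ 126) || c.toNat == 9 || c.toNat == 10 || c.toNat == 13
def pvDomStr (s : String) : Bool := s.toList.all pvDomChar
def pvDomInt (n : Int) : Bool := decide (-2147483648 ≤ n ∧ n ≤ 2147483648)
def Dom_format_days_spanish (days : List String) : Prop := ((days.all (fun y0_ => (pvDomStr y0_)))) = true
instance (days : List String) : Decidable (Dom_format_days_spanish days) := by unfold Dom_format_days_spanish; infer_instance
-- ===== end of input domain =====

-- B replaces A's sorted()-by-weekday-index with a fixed pass over the seven
-- weekdays (label repeated per occurrence count) followed by the unknown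
-- entries in input order; objective: simpler.

-- ===== PORT A =====
-- str.capitalize(): exact on the ASCII domain (first char uppercased, rest lowered)
def pvCapitalize (s : String) : String :=
  match s.toList with
  | [] => s
  | c :: cs => String.ofList (PySem.Chars.upperChar c :: PySem.Chars.lower cs)

def pvDayOrder : List String :=
  ["monday", "tuesday", "wednesday", "thursday", "friday", "saturday", "sunday"]

-- the sort key: day_order.index(x) if x in day_order else 999
def pvDayKey (x : String) : Nat :=
  if pvDayOrder.contains x then (PySem.List.index? pvDayOrder x).getD 999 else 999

def sort_days (days : List String) : List String :=
  PySem.List.sorted days pvDayKey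

def pvDaysMap : PySem.Dict String String :=
  ⟨[("monday", "Lunes"), ("tuesday", "Martes"), ("wednesday", "Miércoles"),
    ("thursday", "Jueves"), ("friday", "Viernes"), ("saturday", "Sábado"),
    ("sunday", "Domingo")]⟩

def format_days_spanish (days : List String) : String :=
  PySem.Str.join ", "
    ((sort_days days).map (fun day => pvDaysMap.getD day (pvCapitalize day)))

-- ===== PORT B =====
def pvWeek : List (String × String) :=
  [("monday", "Lunes"), ("tuesday", "Martes"), ("wednesday", "Miércoles"),
   ("thursday", "Jueves"), ("friday", "Viernes"), ("saturday", "Sábado"),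
   ("sunday", "Domingo")]

def format_days_spanish_alt (days : List String) : String :=
  let parts := pvWeek.flatMap (fun p => List.replicate (days.count p.1) p.2)
  let known := pvWeek.map Prod.fst
  PySem.Str.join ", "
    (parts ++ (days.filter (fun d => !(known.contains d))).map pvCapitalize)

-- ===== PRECONDITION & SPEC =====
def Spec_format_days_spanish (days : List String) (out : String) : Prop := out = format_days_spanish_alt days
instance (days : List String) (out : String) : Decidable (Spec_format_days_spanish days out) := by unfold Spec_format_days_spanish; infer_instance

-- ===== CLAIM (what is proved, stated in full; the proofs are below) =====
def Claim_equal_format_days_spanish : Prop := ∀ (days : List String), Dom_format_days_spanish days → Spec_format_days_spanish days (format_days_spanish days)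

-- ===== LEMMAS AND PROOFS =====

-- the stable-sort output as key-buckets in key order
def pvBuckets (K : List Nat) (l : List String) : List String :=
  K.flatMap (fun k => l.filter (fun y => pvDayKey y == k))

lemma pv_insertBy_skip (before : String → String → Bool) (x : String) :
    ∀ (A B : List String), (∀ a ∈ A, before x a = false) →
    PySem.List.insertBy before x (A ++ B) = A ++ PySem.List.insertBy before x B := by
  intro A
  induction A with
  | nil => intro B _; rfl
  | cons a A ih =>
    intro B h
    simp only [List.cons_append, PySem.List.insertBy, h a (by simp)]
    simp only [Bool.false_eq_true, if_false, List.cons.injEq, true_and]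
    exact ih B (fun a' ha' => h a' (by simp [ha']))

lemma pv_insertBy_cons (before : String → String → Bool) (x : String)
    (B : List String) (h : ∀ b ∈ B, before x b = true) :
    PySem.List.insertBy before x B = x :: B := by
  cases B with
  | nil => rfl
  | cons b B => simp [PySem.List.insertBy, h b (by simp)]

lemma pv_key_mem_filter {l : List String} {k : Nat} {y : String}
    (hy : y ∈ l.filter (fun y => pvDayKey y == k)) : pvDayKey y = k := by
  simp only [List.mem_filter, beq_iff_eq] at hy; exact hy.2

lemma pv_mem_buckets {K : List Nat} {l : List String} {y : String}
    (hy : y ∈ pvBuckets K l) : pvDayKey y ∈ K := by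
  simp only [pvBuckets, List.mem_flatMap, List.mem_filter, beq_iff_eq] at hy
  obtain ⟨k, hk, _, rfl⟩ := hy; exact hk

lemma pvBuckets_append_not_mem (x : String) :
    ∀ (K : List Nat), pvDayKey x ∉ K → ∀ (l : List String),
    pvBuckets K (l ++ [x]) = pvBuckets K l := by
  intro K
  induction K with
  | nil => intro _ _; rfl
  | cons k K ih =>
    intro hx l
    have hk : pvDayKey x ≠ k := fun h => hx (by simp [h])
    have htail := ih (fun h => hx (by simp [h])) l
    simp only [pvBuckets, List.flatMap_cons] at htail ⊢
    rw [List.filter_append, htail]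
    simp [hk]

lemma pv_insert_bucketed (x : String) :
    ∀ (K : List Nat), K.Pairwise (· < ·) → pvDayKey x ∈ K → ∀ (l : List String),
    PySem.List.insertBy (fun a b => decide (pvDayKey a < pvDayKey b)) x (pvBuckets K l)
      = pvBuckets K (l ++ [x]) := by
  intro K
  induction K with
  | nil => intro _ hx; exact absurd hx (by simp)
  | cons k K ih =>
    intro hp hx l
    have hgt : ∀ k' ∈ K, k < k' := (List.pairwise_cons.mp hp).1
    rcases List.mem_cons.mp hx with hxk | hxK
    · -- key x = k: x goes to the end of this bucket
      have hskipA : ∀ a ∈ l.filter (fun y => pvDayKey y == k),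
          decide (pvDayKey x < pvDayKey a) = false := by
        intro a ha
        simp [pv_key_mem_filter ha, hxk]
      have hrw : pvBuckets (k :: K) l
          = l.filter (fun y => pvDayKey y == k) ++ pvBuckets K l := by
        simp [pvBuckets]
      rw [hrw, pv_insertBy_skip _ _ _ _ hskipA,
        pv_insertBy_cons _ _ _ (fun b hb => by
          have := hgt _ (pv_mem_buckets hb); simp [hxk]; omega)]
      have hnK : pvDayKey x ∉ K := fun h => by have := hgt _ h; omega
      have h2 := pvBuckets_append_not_mem x K hnK l
      simp only [pvBuckets, List.flatMap_cons] at h2 ⊢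
      rw [List.filter_append, h2]
      simp [hxk]
    · -- key x ∈ K: recurse past this bucket
      have hkx : k < pvDayKey x := hgt _ hxK
      have hskipA : ∀ a ∈ l.filter (fun y => pvDayKey y == k),
          decide (pvDayKey x < pvDayKey a) = false := by
        intro a ha
        simp [pv_key_mem_filter ha]; omega
      have hrw : pvBuckets (k :: K) l
          = l.filter (fun y => pvDayKey y == k) ++ pvBuckets K l := by
        simp [pvBuckets]
      rw [hrw, pv_insertBy_skip _ _ _ _ hskipA,
        ih (List.pairwise_cons.mp hp).2 hxK l]
      have hne : pvDayKey x ≠ k := by omega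
      simp [pvBuckets, List.filter_append, hne]

lemma pv_sorted_eq_buckets (K : List Nat) (hp : K.Pairwise (· < ·)) :
    ∀ (l : List String), (∀ x ∈ l, pvDayKey x ∈ K) →
    PySem.List.sorted l pvDayKey = pvBuckets K l := by
  intro l
  induction l using List.reverseRecOn with
  | nil => intro _; rw [PySem.List.sorted_eq_foldl_insertBy]; simp [pvBuckets]
  | append_singleton l x ih =>
    intro h
    rw [PySem.List.sorted_eq_foldl_insertBy, List.foldl_append,
      ← PySem.List.sorted_eq_foldl_insertBy,
      ih (fun y hy => h y (by simp [hy]))]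
    exact pv_insert_bucketed x K hp (h x (by simp)) l

lemma pv_key_char (y : String) : pvDayKey y =
    if y = "monday" then 0 else if y = "tuesday" then 1 else if y = "wednesday" then 2
    else if y = "thursday" then 3 else if y = "friday" then 4 else if y = "saturday" then 5
    else if y = "sunday" then 6 else 999 := by
  by_cases hy : y ∈ pvDayOrder
  · simp only [pvDayOrder, List.mem_cons, List.not_mem_nil, or_false] at hy
    rcases hy with rfl | rfl | rfl | rfl | rfl | rfl | rfl <;> decide
  · simp only [pvDayOrder, List.mem_cons, List.not_mem_nil, or_false, not_or] at hy
    obtain ⟨n1, n2, n3, n4, n5, n6, n7⟩ := hy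
    simp [pvDayKey, pvDayOrder, n1, n2, n3, n4, n5, n6, n7]

lemma pv_filter_known (days : List String) (k : Nat) (w : String)
    (hkw : (k, w) ∈ [(0, "monday"), (1, "tuesday"), (2, "wednesday"), (3, "thursday"),
                     (4, "friday"), (5, "saturday"), (6, "sunday")]) :
    days.filter (fun y => pvDayKey y == k) = days.filter (fun y => y == w) := by
  refine List.filter_congr (fun y _ => ?_)
  rw [pv_key_char y]
  simp only [List.mem_cons, List.not_mem_nil, or_false, Prod.mk.injEq] at hkw
  rcases hkw with ⟨rfl, rfl⟩ | ⟨rfl, rfl⟩ | ⟨rfl, rfl⟩ | ⟨rfl, rfl⟩ | ⟨rfl, rfl⟩ | ⟨rfl, rfl⟩ | ⟨rfl, rfl⟩ <;>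
    split_ifs <;> simp_all

lemma pv_filter_unknown (days : List String) :
    days.filter (fun y => pvDayKey y == 999)
      = days.filter (fun d => !((pvWeek.map Prod.fst).contains d)) := by
  refine List.filter_congr (fun y _ => ?_)
  rw [pv_key_char y]
  split_ifs <;> simp_all [pvWeek]

lemma pv_getD_unknown (d : String) (hd : (pvWeek.map Prod.fst).contains d = false) :
    pvDaysMap.getD d (pvCapitalize d) = pvCapitalize d := by
  simp only [pvWeek, List.map_cons, List.map_nil, List.contains_eq_mem, List.mem_cons,
    List.not_mem_nil, or_false, not_or, decide_eq_false_iff_not] at hd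
  obtain ⟨n1, n2, n3, n4, n5, n6, n7⟩ := hd
  have e1 : ("monday" == d) = false := by simp [Ne.symm n1]
  have e2 : ("tuesday" == d) = false := by simp [Ne.symm n2]
  have e3 : ("wednesday" == d) = false := by simp [Ne.symm n3]
  have e4 : ("thursday" == d) = false := by simp [Ne.symm n4]
  have e5 : ("friday" == d) = false := by simp [Ne.symm n5]
  have e6 : ("saturday" == d) = false := by simp [Ne.symm n6]
  have e7 : ("sunday" == d) = false := by simp [Ne.symm n7]
  simp [PySem.Dict.getD, PySem.Dict.get?, pvDaysMap, List.find?, e1, e2, e3, e4, e5, e6, e7]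

-- ===== VERDICT (by name: the statement is the Claim_ definition above) =====
theorem format_days_spanish_spec : Claim_equal_format_days_spanish := by
  unfold Claim_equal_format_days_spanish
  intro days _
  unfold Spec_format_days_spanish format_days_spanish format_days_spanish_alt sort_days
  have hK : ([0, 1, 2, 3, 4, 5, 6, 999] : List Nat).Pairwise (· < ·) := by decide
  have hmem : ∀ x ∈ days, pvDayKey x ∈ ([0, 1, 2, 3, 4, 5, 6, 999] : List Nat) := by
    intro x _
    rw [pv_key_char x]
    split_ifs <;> simp
  rw [pv_sorted_eq_buckets _ hK days hmem]
  simp only [pvBuckets, List.flatMap_cons, List.flatMap_nil, List.append_nil]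
  rw [pv_filter_known days 0 "monday" (by simp), pv_filter_known days 1 "tuesday" (by simp),
    pv_filter_known days 2 "wednesday" (by simp), pv_filter_known days 3 "thursday" (by simp),
    pv_filter_known days 4 "friday" (by simp), pv_filter_known days 5 "saturday" (by simp),
    pv_filter_known days 6 "sunday" (by simp), pv_filter_unknown days]
  simp only [List.filter_beq, List.map_append, List.map_replicate]
  rw [List.map_congr_left (fun d hd => pv_getD_unknown d (by
    simp only [List.mem_filter, Bool.not_eq_eq_eq_not, Bool.not_true] at hd
    exact hd.2))]
  simp only [show pvDaysMap.getD "monday" (pvCapitalize "monday") = "Lunes" from rfl,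
    show pvDaysMap.getD "tuesday" (pvCapitalize "tuesday") = "Martes" from rfl,
    show pvDaysMap.getD "wednesday" (pvCapitalize "wednesday") = "Miércoles" from rfl,
    show pvDaysMap.getD "thursday" (pvCapitalize "thursday") = "Jueves" from rfl,
    show pvDaysMap.getD "friday" (pvCapitalize "friday") = "Viernes" from rfl,
    show pvDaysMap.getD "saturday" (pvCapitalize "saturday") = "Sábado" from rfl,
    show pvDaysMap.getD "sunday" (pvCapitalize "sunday") = "Domingo" from rfl]
  simp [pvWeek, List.count]
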